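-- pv_equiv track=rewrite | github.com/hjkim977/Coding-Test | 프로그래머스/0/120864. 숨어있는 숫자의 덧셈 （2）/숨어있는 숫자의 덧셈 （2）.py | solution
-- ===== SOURCE A (Python) =====
-- def solution(my_string):
--     a=0
--     num=''
--     for i in my_string:
--         if i.isdigit():
--             num+=i
--         else:
--             if num!='':
--                 a+=int(num)
--                 num=''
--     if num!='':
--         a+=int(num)
--     return a
-- ===== SOURCE B (Python) =====
-- def solution(my_string):
--     total = 0
--     place = 1
--     for c in reversed(my_string):
--         if c.isdigit():
--             total += int(c) * place
--             place *= 10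
--         else:
--             place = 1
--     return total
-- ===== Notes on version B (the rewrite author's own statement) =====
-- stated objective: alternative
-- what changed: Instead of buffering digit runs and converting each buffered substring with int(), B scans the string right-to-left once and adds each digit's positional contribution digit*place, where place is a running power of 10 reset to 1 at every non-digit; no buffer and no string-to-int conversion exist in B.
import Mathlib
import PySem

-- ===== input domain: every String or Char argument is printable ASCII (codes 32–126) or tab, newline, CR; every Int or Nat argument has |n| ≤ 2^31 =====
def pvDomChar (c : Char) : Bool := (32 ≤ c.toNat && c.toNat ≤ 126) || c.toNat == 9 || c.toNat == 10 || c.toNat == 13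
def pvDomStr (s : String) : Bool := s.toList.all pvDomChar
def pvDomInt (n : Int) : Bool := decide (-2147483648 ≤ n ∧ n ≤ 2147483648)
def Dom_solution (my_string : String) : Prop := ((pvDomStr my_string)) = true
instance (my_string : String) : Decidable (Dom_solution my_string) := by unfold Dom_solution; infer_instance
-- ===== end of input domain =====

-- B replaces A's digit-buffer/int() state machine by a single right-to-left pass that adds
-- each digit's positional contribution digit*place (place = running power of 10, reset at
-- every non-digit); same O(n) cost, genuinely different decomposition (objective: alternative).

-- int(num) for num a run of ASCII digit characters, ported by hand as the decimal fold;
-- exact there (A only ever calls int() on nonempty buffers of chars with isdigit true,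
-- which on the printable-ASCII domain are exactly '0'..'9').
def pvInt (cs : List Char) : Int := cs.foldl (fun a c => a * 10 + ((c.toNat : Int) - 48)) 0

-- ===== PORT A =====
def solution (my_string : String) : Int :=
  let r := my_string.toList.foldl
    (fun (s : Int × List Char) (i : Char) =>
      if PySem.Chars.isdigit i then (s.1, s.2 ++ [i])
      else if s.2 ≠ [] then (s.1 + pvInt s.2, []) else s)
    (0, [])
  if r.2 ≠ [] then r.1 + pvInt r.2 else r.1

-- ===== PORT B =====
-- for c in reversed(my_string): state (total, place)
def solution_alt (my_string : String) : Int :=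
  (my_string.toList.reverse.foldl
    (fun (s : Int × Int) (c : Char) =>
      if PySem.Chars.isdigit c then (s.1 + ((c.toNat : Int) - 48) * s.2, s.2 * 10)
      else (s.1, 1))
    (0, 1)).1

-- ===== PRECONDITION & SPEC =====
def Spec_solution (my_string : String) (out : Int) : Prop := out = solution_alt my_string
instance (my_string : String) (out : Int) : Decidable (Spec_solution my_string out) := by unfold Spec_solution; infer_instance

-- ===== CLAIM (what is proved, stated in full; the proofs are below) =====
def Claim_equal_solution : Prop := ∀ (my_string : String), Dom_solution my_string → Spec_solution my_string (solution my_string)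

-- ===== LEMMAS AND PROOFS =====

-- proof-side view: split the string into maximal same-kind runs and sum the digit runs;
-- both ports are proved equal to pvSumB.
def pvGroupby : List Char → List (Bool × List Char)
  | [] => []
  | c :: cs =>
    let k := PySem.Chars.isdigit c
    (k, c :: cs.takeWhile (fun x => PySem.Chars.isdigit x == k)) ::
      pvGroupby (cs.dropWhile (fun x => PySem.Chars.isdigit x == k))
termination_by l => l.length
decreasing_by
  exact Nat.lt_succ_of_le (List.length_dropWhile_le _ _)

def pvSumG : List (Bool × List Char) → Int
  | [] => 0
  | (k, g) :: gs => (if k then pvInt g else 0) + pvSumG gs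

def pvSumB (l : List Char) : Int := pvSumG (pvGroupby l)

lemma gb_nil : pvGroupby [] = [] := by rw [pvGroupby]

lemma gb_cons (c : Char) (cs : List Char) :
    pvGroupby (c :: cs) =
      (PySem.Chars.isdigit c,
        c :: cs.takeWhile (fun x => PySem.Chars.isdigit x == PySem.Chars.isdigit c)) ::
        pvGroupby (cs.dropWhile (fun x => PySem.Chars.isdigit x == PySem.Chars.isdigit c)) := by
  conv_lhs => rw [pvGroupby]

lemma sumB_digit (c : Char) (cs : List Char) (h : PySem.Chars.isdigit c = true) :
    pvSumB (c :: cs) =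
      pvInt (c :: cs.takeWhile (fun x => PySem.Chars.isdigit x)) +
        pvSumG (pvGroupby (cs.dropWhile (fun x => PySem.Chars.isdigit x))) := by
  have hpred : (fun x => PySem.Chars.isdigit x == PySem.Chars.isdigit c)
      = (fun x => PySem.Chars.isdigit x) := by
    funext x; simp [h]
  rw [pvSumB, gb_cons, hpred, h]
  simp [pvSumG]

lemma sumB_nondigit (c : Char) (cs : List Char) (h : PySem.Chars.isdigit c = false) :
    pvSumB (c :: cs) = pvSumB cs := by
  rw [pvSumB, gb_cons, h]
  simp only [pvSumG, Bool.false_eq_true, if_false, zero_add]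
  cases cs with
  | nil => simp [pvSumB]
  | cons d t =>
    by_cases hd : PySem.Chars.isdigit d
    · simp [hd, pvSumB]
    · have hd' : PySem.Chars.isdigit d = false := by simpa using hd
      rw [pvSumB, gb_cons d t, hd']
      simp [pvSumG, hd']

-- ---- A = pvSumB ----

-- the value A still owes, given the pending digit buffer num
def pvOwe (num l : List Char) : Int :=
  if num = [] then pvSumB l
  else pvInt (num ++ l.takeWhile (fun x => PySem.Chars.isdigit x)) +
         pvSumG (pvGroupby (l.dropWhile (fun x => PySem.Chars.isdigit x)))

lemma main_invariant (l : List Char) : ∀ (a : Int) (num : List Char),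
    (let r := l.foldl
        (fun (s : Int × List Char) (i : Char) =>
          if PySem.Chars.isdigit i then (s.1, s.2 ++ [i])
          else if s.2 ≠ [] then (s.1 + pvInt s.2, []) else s)
        (a, num);
      if r.2 ≠ [] then r.1 + pvInt r.2 else r.1) = a + pvOwe num l := by
  induction l with
  | nil =>
    intro a num
    by_cases h : num = [] <;>
      simp [h, pvOwe, pvSumB, gb_nil, pvSumG, pvInt]
  | cons c cs ih =>
    intro a num
    by_cases hc : PySem.Chars.isdigit c
    · simp only [List.foldl_cons, if_pos hc]
      rw [ih a (num ++ [c])]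
      congr 1
      have hne : num ++ [c] ≠ [] := by simp
      by_cases hnum : num = []
      · subst hnum
        rw [pvOwe, if_neg hne, pvOwe, if_pos rfl, sumB_digit c cs hc]
        simp
      · rw [pvOwe, if_neg hne, pvOwe, if_neg hnum]
        simp [hc, List.append_assoc]
    · have hc' : PySem.Chars.isdigit c = false := by simpa using hc
      simp only [List.foldl_cons, hc', Bool.false_eq_true, if_false]
      by_cases hnum : num = []
      · subst hnum
        simp only [ne_eq, not_true_eq_false, if_false]
        rw [ih a []]
        have : pvOwe [] (c :: cs) = pvOwe [] cs := by
          simp [pvOwe, sumB_nondigit c cs hc']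
        rw [this]
      · simp only [if_pos hnum]
        rw [ih (a + pvInt num) []]
        rw [pvOwe, if_pos rfl, pvOwe, if_neg hnum]
        rw [List.takeWhile_cons, List.dropWhile_cons]
        simp only [hc', Bool.false_eq_true, if_false, List.append_nil]
        rw [show pvSumG (pvGroupby (c :: cs)) = pvSumB (c :: cs) from rfl,
          sumB_nondigit c cs hc', pvSumB]
        ring

-- ---- B = pvSumB ----

-- the decimal fold from any seed: seed shifts left by the number of remaining digits
lemma pvInt_fold_seed (l : List Char) : ∀ a : Int,
    l.foldl (fun a c => a * 10 + ((c.toNat : Int) - 48)) a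
      = a * 10 ^ l.length + pvInt l := by
  induction l with
  | nil =>
    intro a
    simp only [List.foldl_nil, pvInt, List.length_nil, pow_zero, mul_one, add_zero]
  | cons c cs ih =>
    intro a
    rw [List.foldl_cons, ih]
    conv_rhs => rw [pvInt, List.foldl_cons]
    rw [ih]
    simp only [List.length_cons]
    ring

lemma pvInt_cons (c : Char) (ds : List Char) :
    pvInt (c :: ds) = ((c.toNat : Int) - 48) * 10 ^ ds.length + pvInt ds := by
  rw [pvInt, List.foldl_cons]
  rw [pvInt_fold_seed]
  ring_nf

-- pvSumB always splits off the leading digit run (pvInt [] = 0 covers the empty run)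
lemma sumB_split (l : List Char) :
    pvSumB l = pvInt (l.takeWhile (fun x => PySem.Chars.isdigit x)) +
      pvSumG (pvGroupby (l.dropWhile (fun x => PySem.Chars.isdigit x))) := by
  cases l with
  | nil => simp [pvSumB, gb_nil, pvSumG, pvInt]
  | cons c cs =>
    by_cases hc : PySem.Chars.isdigit c
    · rw [sumB_digit c cs hc, List.takeWhile_cons, List.dropWhile_cons]
      simp [hc]
    · have hc' : PySem.Chars.isdigit c = false := by simpa using hc
      rw [sumB_nondigit c cs hc', List.takeWhile_cons, List.dropWhile_cons]
      simp only [hc', Bool.false_eq_true, if_false]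
      rw [show pvInt [] = 0 from rfl, zero_add,
        show pvSumG (pvGroupby (c :: cs)) = pvSumB (c :: cs) from rfl,
        sumB_nondigit c cs hc']

-- prepending a digit to the string adds its positional contribution
lemma sumB_cons_digit (c : Char) (cs : List Char) (h : PySem.Chars.isdigit c = true) :
    pvSumB (c :: cs) =
      pvSumB cs + ((c.toNat : Int) - 48)
        * 10 ^ (cs.takeWhile (fun x => PySem.Chars.isdigit x)).length := by
  rw [sumB_digit c cs h, pvInt_cons, sumB_split cs]
  ring

-- invariant for B's reversed fold, phrased as a foldr over the original list
lemma alt_invariant (l : List Char) :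
    l.foldr
      (fun (c : Char) (s : Int × Int) =>
        if PySem.Chars.isdigit c then (s.1 + ((c.toNat : Int) - 48) * s.2, s.2 * 10)
        else (s.1, 1))
      (0, 1)
    = (pvSumB l, 10 ^ (l.takeWhile (fun x => PySem.Chars.isdigit x)).length) := by
  induction l with
  | nil => simp [pvSumB, gb_nil, pvSumG]
  | cons c cs ih =>
    rw [List.foldr_cons, ih]
    by_cases hc : PySem.Chars.isdigit c
    · simp only [List.takeWhile_cons, hc, if_true, List.length_cons,
        sumB_cons_digit c cs hc]
      exact Prod.ext rfl (by ring)
    · have hc' : PySem.Chars.isdigit c = false := by simpa using hc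
      simp [hc', sumB_nondigit c cs hc']

-- ===== VERDICT (by name: the statement is the Claim_ definition above) =====
theorem solution_spec : Claim_equal_solution := by
  intro s _
  show solution s = solution_alt s
  rw [solution, solution_alt, List.foldl_reverse]
  have hA := main_invariant s.toList 0 []
  simp only at hA
  rw [hA, alt_invariant]
  simp [pvOwe]
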